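-- pv_equiv track=rewrite | github.com/SJ0000/PS | BOJ/BOJ_17615.py | solution
-- ===== SOURCE A (Python) =====
-- def solution(a):
--     n = len(a)
--     r = len(list(filter(lambda x: x == 'R', a)))
--     b = n-r
--     if r == 0 or b == 0:
--         return 0
--     front_r, rear_r, front_b, rear_b = 0, 0, 0, 0
--     for i in range(n):
--         if a[0] == 'R' and a[i] == 'R':
--             front_r += 1
--         elif a[0] == 'B' and a[i] == 'B':
--             front_b += 1
--         else:
--             break
--     for i in range(n-1, -1, -1):
--         if a[-1] == 'R' and a[i] == 'R':
--             rear_r += 1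
--         elif a[-1] == 'B' and a[i] == 'B':
--             rear_b += 1
--         else:
--             break
--     return min(r-front_r, r-rear_r, b-front_b, b-rear_b)
-- ===== SOURCE B (Python) =====
-- def solution(a):
--     # Run-length encode a in a single pass carrying (cur, k), then answer from the RLE.
--     runs = []
--     cur, k = None, 0
--     for x in a:
--         if k and x == cur:
--             k += 1
--         else:
--             if k:
--                 runs.append((cur, k))
--             cur, k = x, 1
--     if k:
--         runs.append((cur, k))
--     r = sum(L for c, L in runs if c == 'R')
--     b = len(a) - r
--     if r == 0 or b == 0:
--         return 0
--     c0, L0 = runs[0]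
--     c1, L1 = runs[-1]
--     return min(r - (L0 if c0 == 'R' else 0),
--                r - (L1 if c1 == 'R' else 0),
--                b - (L0 if c0 == 'B' else 0),
--                b - (L1 if c1 == 'B' else 0))
-- ===== Notes on version B (the rewrite author's own statement) =====
-- stated objective: alternative
-- what changed: B run-length encodes the list in one pass into a list of (color, length) runs and computes everything from that structure: r as the sum of R-run lengths and the endpoint runs as runs[0]/runs[-1], instead of A's separate filter-count plus two index loops with break over the raw list.
import Mathlib
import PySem

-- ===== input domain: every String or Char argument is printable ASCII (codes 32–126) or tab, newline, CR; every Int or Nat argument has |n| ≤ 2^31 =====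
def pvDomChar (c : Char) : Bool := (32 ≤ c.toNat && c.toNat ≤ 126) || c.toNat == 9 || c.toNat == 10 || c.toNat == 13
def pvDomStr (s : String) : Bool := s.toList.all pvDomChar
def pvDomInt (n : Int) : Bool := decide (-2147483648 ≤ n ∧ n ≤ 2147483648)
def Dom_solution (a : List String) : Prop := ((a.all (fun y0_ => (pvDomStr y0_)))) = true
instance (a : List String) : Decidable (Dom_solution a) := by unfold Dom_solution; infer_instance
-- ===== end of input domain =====

-- B run-length encodes the list once into (color, length) runs and reads r and both endpoint runs off that structure (alternative; same cost).

-- ===== PORT A =====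
-- front loop of A: i walks up from 0; a[0] is read each iteration (list nonempty whenever the body runs, so headD is exact)
def solutionFront (a : List String) (i : Nat) (fr fb : Int) : Int × Int :=
  if h : i < a.length then
    if a.headD "" = "R" ∧ a[i] = "R" then solutionFront a (i + 1) (fr + 1) fb
    else if a.headD "" = "B" ∧ a[i] = "B" then solutionFront a (i + 1) fr (fb + 1)
    else (fr, fb)
  else (fr, fb)
termination_by a.length - i

-- rear loop of A: i walks down from n-1 to 0; a[-1] = getLast (list nonempty whenever the body runs, so getLastD is exact)
def solutionRear (a : List String) (i : Nat) (rr rb : Int) : Int × Int :=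
  if _h : i < a.length then
    if a.getLastD "" = "R" ∧ a[i] = "R" then
      if i = 0 then (rr + 1, rb) else solutionRear a (i - 1) (rr + 1) rb
    else if a.getLastD "" = "B" ∧ a[i] = "B" then
      if i = 0 then (rr, rb + 1) else solutionRear a (i - 1) rr (rb + 1)
    else (rr, rb)
  else (rr, rb)
termination_by i
decreasing_by all_goals omega

def solution (a : List String) : Int :=
  let n : Int := a.length
  let r : Int := ((a.filter (fun x => x == "R")).length : Int)
  let b : Int := n - r
  if r = 0 ∨ b = 0 then 0
  else
    let fp := solutionFront a 0 0 0
    let rp := solutionRear a (a.length - 1) 0 0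
    min (min (r - fp.1) (r - rp.1)) (min (b - fp.2) (b - rp.2))

-- ===== PORT B =====
-- B's single pass carrying (cur, k): emit (cur, k) when the color changes, as structural recursion
def rleGo (cur : String) (k : Nat) : List String → List (String × Nat)
  | [] => [(cur, k)]
  | x :: xs => if x = cur then rleGo cur (k + 1) xs else (cur, k) :: rleGo x 1 xs

def rle : List String → List (String × Nat)
  | [] => []
  | x :: xs => rleGo x 1 xs

def solution_alt (a : List String) : Int :=
  let runs := rle a
  let r : Int := (((runs.filter (fun p => p.1 == "R")).map (fun p => (p.2 : Int))).sum)
  let b : Int := (a.length : Int) - r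
  if r = 0 ∨ b = 0 then 0
  else
    let f := runs.headD ("", 0)
    let l := runs.getLastD ("", 0)
    min (min (r - (if f.1 = "R" then (f.2 : Int) else 0))
             (r - (if l.1 = "R" then (l.2 : Int) else 0)))
        (min (b - (if f.1 = "B" then (f.2 : Int) else 0))
             (b - (if l.1 = "B" then (l.2 : Int) else 0)))

-- ===== PRECONDITION & SPEC =====
def Spec_solution (a : List String) (out : Int) : Prop := out = solution_alt a
instance (a : List String) (out : Int) : Decidable (Spec_solution a out) := by unfold Spec_solution; infer_instance

-- ===== CLAIM (what is proved, stated in full; the proofs are below) =====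
def Claim_equal_solution : Prop := ∀ (a : List String), Dom_solution a → Spec_solution a (solution a)

-- ===== LEMMAS AND PROOFS =====

-- characterization of A's front loop
theorem front_run (a : List String) (c : String) (hc : a.headD "" = c)
    (hR : c = "R" ∨ c = "B") :
    ∀ i (fr fb : Int), solutionFront a i fr fb =
      (if c = "R" then (fr + (((a.drop i).takeWhile (fun x => x == c)).length : Int), fb)
       else (fr, fb + (((a.drop i).takeWhile (fun x => x == c)).length : Int))) := by
  have key : ∀ k i (fr fb : Int), a.length - i ≤ k → solutionFront a i fr fb =
      (if c = "R" then (fr + (((a.drop i).takeWhile (fun x => x == c)).length : Int), fb)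
       else (fr, fb + (((a.drop i).takeWhile (fun x => x == c)).length : Int))) := by
    intro k
    induction k with
    | zero =>
      intro i fr fb h
      have hi : a.length ≤ i := by omega
      rw [solutionFront, dif_neg (by omega), List.drop_eq_nil_of_le hi]
      rcases hR with h1 | h1 <;> subst h1 <;> simp
    | succ k ih =>
      intro i fr fb h
      by_cases hi : i < a.length
      · rw [solutionFront, dif_pos hi, List.drop_eq_getElem_cons hi]
        by_cases he : a[i] = c
        · have hcond1 : (a.headD "" = "R" ∧ a[i] = "R") ↔ c = "R" := by
            constructor
            · intro ⟨_, h2⟩; rw [← he, h2]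
            · intro h2; exact ⟨by rw [hc, h2], by rw [he, h2]⟩
          have hcond2 : (a.headD "" = "B" ∧ a[i] = "B") ↔ c = "B" := by
            constructor
            · intro ⟨_, h2⟩; rw [← he, h2]
            · intro h2; exact ⟨by rw [hc, h2], by rw [he, h2]⟩
          have hrec := ih (i+1) (fr+1) fb (by omega)
          have hrec2 := ih (i+1) fr (fb+1) (by omega)
          rcases hR with h1 | h1
          · rw [if_pos (hcond1.mpr h1), hrec, if_pos h1, if_pos h1]
            simp [he, h1]
            ring
          · have : c ≠ "R" := by rw [h1]; decide
            rw [if_neg (fun hx => this (hcond1.mp hx)), if_pos (hcond2.mpr h1), hrec2,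
                if_neg this, if_neg this]
            simp [he, h1]
            ring
        · have hne1 : ¬ (a.headD "" = "R" ∧ a[i] = "R") := by
            rintro ⟨h1, h2⟩; rw [hc] at h1; exact he (by rw [h2, ← h1])
          have hne2 : ¬ (a.headD "" = "B" ∧ a[i] = "B") := by
            rintro ⟨h1, h2⟩; rw [hc] at h1; exact he (by rw [h2, ← h1])
          rw [if_neg hne1, if_neg hne2]
          have : (a[i] == c) = false := by simp [he]
          rcases hR with h1 | h1 <;> subst h1 <;> simp [List.takeWhile, this]
      · rw [solutionFront, dif_neg hi, List.drop_eq_nil_of_le (by omega)]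
        rcases hR with h1 | h1 <;> subst h1 <;> simp
  intro i fr fb; exact key (a.length - i) i fr fb le_rfl

theorem front_other (a : List String) (hc1 : a.headD "" ≠ "R") (hc2 : a.headD "" ≠ "B") :
    ∀ i (fr fb : Int), solutionFront a i fr fb = (fr, fb) := by
  intro i fr fb
  rw [solutionFront]
  split
  · rw [if_neg (fun hx => hc1 hx.1), if_neg (fun hx => hc2 hx.1)]
  · rfl

theorem rear_other (a : List String) (hc1 : a.getLastD "" ≠ "R") (hc2 : a.getLastD "" ≠ "B") :
    ∀ i (rr rb : Int), solutionRear a i rr rb = (rr, rb) := by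
  intro i rr rb
  rw [solutionRear]
  split
  · rw [if_neg (fun hx => hc1 hx.1), if_neg (fun hx => hc2 hx.1)]
  · rfl

theorem rear_run (a : List String) (c : String) (hc : a.getLastD "" = c)
    (hR : c = "R" ∨ c = "B") :
    ∀ i (rr rb : Int), i < a.length → solutionRear a i rr rb =
      (if c = "R" then (rr + ((((a.take (i+1)).reverse).takeWhile (fun x => x == c)).length : Int), rb)
       else (rr, rb + ((((a.take (i+1)).reverse).takeWhile (fun x => x == c)).length : Int))) := by
  intro i
  induction i using Nat.strong_induction_on with
  | _ i ih =>
    intro rr rb hi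
    rw [solutionRear, dif_pos hi]
    have htake : (a.take (i+1)).reverse = a[i] :: (a.take i).reverse := by
      rw [List.take_add_one, List.getElem?_eq_getElem hi]
      simp
    by_cases he : a[i] = c
    · have hcond1 : (a.getLastD "" = "R" ∧ a[i] = "R") ↔ c = "R" := by
        constructor
        · intro ⟨_, h2⟩; rw [← he, h2]
        · intro h2; exact ⟨by rw [hc, h2], by rw [he, h2]⟩
      have hcond2 : (a.getLastD "" = "B" ∧ a[i] = "B") ↔ c = "B" := by
        constructor
        · intro ⟨_, h2⟩; rw [← he, h2]
        · intro h2; exact ⟨by rw [hc, h2], by rw [he, h2]⟩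
      by_cases hz : i = 0
      · subst hz
        rcases hR with h1 | h1
        · rw [if_pos (hcond1.mpr h1), if_pos rfl, if_pos h1]
          simp [htake, he, h1]
        · have hcne : c ≠ "R" := by rw [h1]; decide
          rw [if_neg (fun hx => hcne (hcond1.mp hx)), if_pos (hcond2.mpr h1), if_pos rfl,
              if_neg hcne]
          simp [htake, he, h1]
      · have hrec := ih (i-1) (by omega)
        have hsub : i - 1 + 1 = i := by omega
        rcases hR with h1 | h1
        · rw [if_pos (hcond1.mpr h1), if_neg hz, hrec (rr+1) rb (by omega), if_pos h1,
              if_pos h1, hsub]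
          simp [htake, he, h1]
          ring
        · have hcne : c ≠ "R" := by rw [h1]; decide
          rw [if_neg (fun hx => hcne (hcond1.mp hx)), if_pos (hcond2.mpr h1), if_neg hz,
              hrec rr (rb+1) (by omega), if_neg hcne, if_neg hcne, hsub]
          simp [htake, he, h1]
          ring
    · have hne1 : ¬ (a.getLastD "" = "R" ∧ a[i] = "R") := by
        rintro ⟨h1, h2⟩; rw [hc] at h1; exact he (by rw [h2, ← h1])
      have hne2 : ¬ (a.getLastD "" = "B" ∧ a[i] = "B") := by
        rintro ⟨h1, h2⟩; rw [hc] at h1; exact he (by rw [h2, ← h1])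
      rw [if_neg hne1, if_neg hne2]
      have hb : (a[i] == c) = false := by simp [he]
      rcases hR with h1 | h1 <;> subst h1 <;> simp [htake, hb]

-- ===== RLE lemmas (characterize B's run list) =====

theorem rleGo_sumR (ys : List String) : ∀ (cur : String) (k : Nat),
    (((rleGo cur k ys).filter (fun p => p.1 == "R")).map (fun p => (p.2 : Int))).sum =
      (if cur = "R" then (k : Int) else 0) + ((ys.filter (fun x => x == "R")).length : Int) := by
  induction ys with
  | nil => intro cur k; by_cases h : cur = "R" <;> simp [rleGo, h]
  | cons y ys ih =>
    intro cur k
    rw [rleGo]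
    by_cases hy : y = cur
    · rw [if_pos hy, ih]
      subst hy
      by_cases h : y = "R" <;> simp [h] <;> push_cast <;> ring
    · rw [if_neg hy]
      by_cases h : cur = "R"
      · have hyR : (y == "R") = false := by simp; intro hc; exact hy (hc.trans h.symm)
        simp [h, ih, hyR]
        by_cases h2 : y = "R"
        · exact absurd (h2.trans h.symm) hy
        · simp [h2]
      · simp [h, ih]
        by_cases h2 : y = "R" <;> simp [h2] <;> push_cast <;> ring

theorem rleGo_head (ys : List String) : ∀ (cur : String) (k : Nat) (d : String × Nat),
    (rleGo cur k ys).headD d = (cur, k + (ys.takeWhile (fun x => x == cur)).length) := by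
  induction ys with
  | nil => intro cur k d; simp [rleGo]
  | cons y ys ih =>
    intro cur k d
    rw [rleGo]
    by_cases hy : y = cur
    · rw [if_pos hy, ih]
      simp [hy]
      omega
    · have : (y == cur) = false := by simp [hy]
      simp [hy, this]

theorem lastD_all (ys : List String) (y : String) (ha : ∀ x ∈ ys, x = y) :
    ys.getLastD y = y := by
  induction ys with
  | nil => rfl
  | cons z zs ih =>
    have hz := ha z (by simp)
    subst hz
    rw [List.getLastD_cons]
    exact ih (fun x hx => ha x (List.mem_cons_of_mem _ hx))

theorem takeWhile_all (l : List String) (y : String) (h : ∀ x ∈ l, x = y) :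
    l.takeWhile (fun x => x == y) = l :=
  List.takeWhile_eq_self_iff.mpr (fun x hx => by simp [h x hx])

-- the trailing-run length of y :: (run list corresponding to ys), read off ys
theorem run_step (ys : List String) (y : String) :
    ((ys.reverse ++ [y]).takeWhile (fun x => x == (y :: ys).getLastD "")).length =
      (if ys.all (fun x => x == y) then 1 else 0) +
        (ys.reverse.takeWhile (fun x => x == ys.getLastD y)).length := by
  have hlast : (y :: ys).getLastD "" = ys.getLastD y := by rw [List.getLastD_cons]
  rw [hlast]
  by_cases ha : ys.all (fun x => x == y)
  · have ha' : ∀ x ∈ ys, x = y := fun x hx => by simpa using List.all_eq_true.mp ha x hx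
    have hld : ys.getLastD y = y := lastD_all ys y ha'
    have har : ∀ x ∈ ys.reverse, x = y := fun x hx => ha' x (by simpa using hx)
    have har2 : ∀ x ∈ ys.reverse ++ [y], x = y := by
      intro x hx
      rcases List.mem_append.mp hx with h | h
      · exact har x h
      · simpa using h
    rw [hld, if_pos ha, takeWhile_all ys.reverse y har, takeWhile_all (ys.reverse ++ [y]) y har2]
    simp
    omega
  · have ⟨z, hz, hzy⟩ : ∃ z ∈ ys, z ≠ y := by
      by_contra hcon
      refine ha (List.all_eq_true.mpr (fun x hx => ?_))
      by_cases hxy : x = y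
      · simp [hxy]
      · exact absurd ⟨x, hx, hxy⟩ hcon
    have hysne : ys ≠ [] := by rintro rfl; simp at hz
    have hld : ys.getLastD y = ys.getLastD "" := by
      cases ys
      · exact absurd rfl hysne
      · rw [List.getLastD_cons, List.getLastD_cons]
    rw [if_neg ha, hld]
    set c := ys.getLastD "" with hc
    by_cases hall2 : ∀ x ∈ ys.reverse, x = c
    · have hyc : y ≠ c := by
        intro hyc
        exact hzy ((hall2 z (by simpa using hz)).trans hyc.symm)
      rw [List.takeWhile_append, takeWhile_all ys.reverse c hall2, if_pos rfl]
      have : (y == c) = false := by simpa using hyc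
      simp [List.takeWhile, this]
    · have hneq : ¬ (List.takeWhile (fun x => x == c) ys.reverse).length = ys.reverse.length := by
        intro hlen
        have hself := (List.takeWhile_prefix (l := ys.reverse) (p := fun x => x == c)).eq_of_length hlen
        have hall := List.takeWhile_eq_self_iff.mp hself
        exact hall2 (fun x hx => by simpa using hall x hx)
      rw [List.takeWhile_append, if_neg hneq]
      simp

theorem rleGo_last (ys : List String) : ∀ (cur : String) (k : Nat) (d : String × Nat),
    (rleGo cur k ys).getLastD d =
      (ys.getLastD cur,
       (if ys.all (fun x => x == cur) then k else 0) +
         (ys.reverse.takeWhile (fun x => x == ys.getLastD cur)).length) := by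
  induction ys with
  | nil => intro cur k d; simp [rleGo]
  | cons y ys ih =>
    intro cur k d
    rw [rleGo]
    by_cases hy : y = cur
    · rw [if_pos hy, ih]
      subst hy
      have hlast : (y :: ys).getLastD y = ys.getLastD y := by rw [List.getLastD_cons]
      have hlast2 : (y :: ys).getLastD "" = ys.getLastD y := by rw [List.getLastD_cons]
      have hall : ((y :: ys).all (fun x => x == y)) = ys.all (fun x => x == y) := by simp
      have hstep := run_step ys y
      rw [hlast2] at hstep
      rw [hlast, hall, List.reverse_cons, hstep]
      by_cases ha : ys.all (fun x => x == y) <;> simp [ha] <;> omega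
    · rw [if_neg hy, List.getLastD_cons, ih]
      have hall : ((y :: ys).all (fun x => x == cur)) = false := by
        simp only [List.all_cons, Bool.and_eq_false_iff]
        exact Or.inl (by simpa using hy)
      have hlast : (y :: ys).getLastD cur = ys.getLastD y := by rw [List.getLastD_cons]
      have hstep := run_step ys y
      have hlast2 : (y :: ys).getLastD "" = ys.getLastD y := by rw [List.getLastD_cons]
      rw [hlast2] at hstep
      rw [hall, hlast, List.reverse_cons, hstep]
      by_cases ha : ys.all (fun x => x == y) <;> simp [ha]


-- rle on a nonempty list: sum of R-run lengths, first run, last run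
theorem rle_sumR (a : List String) :
    (((rle a).filter (fun p => p.1 == "R")).map (fun p => (p.2 : Int))).sum =
      ((a.filter (fun x => x == "R")).length : Int) := by
  cases a with
  | nil => simp [rle]
  | cons x xs =>
    rw [rle, rleGo_sumR]
    by_cases h : x = "R" <;> simp [h] <;> push_cast <;> ring

theorem rle_head (a : List String) (h : a ≠ []) (d : String × Nat) :
    (rle a).headD d = (a.headD "", (a.takeWhile (fun x => x == a.headD "")).length) := by
  cases a with
  | nil => exact absurd rfl h
  | cons x xs =>
    rw [rle, rleGo_head]
    simp [List.takeWhile]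
    omega

theorem rle_last (a : List String) (h : a ≠ []) (d : String × Nat) :
    (rle a).getLastD d = (a.getLastD "", (a.reverse.takeWhile (fun x => x == a.getLastD "")).length) := by
  cases a with
  | nil => exact absurd rfl h
  | cons x xs =>
    rw [rle, rleGo_last]
    have hlast : (x :: xs).getLastD "" = xs.getLastD x := by rw [List.getLastD_cons]
    have hstep := run_step xs x
    rw [hlast] at hstep ⊢
    rw [List.reverse_cons, hstep]

-- ===== VERDICT (by name: the statement is the Claim_ definition above) =====
theorem solution_spec : Claim_equal_solution := by
  unfold Claim_equal_solution Spec_solution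
  intro a _
  by_cases h0 : ((a.filter (fun x => x == "R")).length : Int) = 0 ∨
      (a.length : Int) - ((a.filter (fun x => x == "R")).length : Int) = 0
  · simp only [solution, solution_alt, rle_sumR, if_pos h0]
  · have hne : a ≠ [] := by
      rintro rfl
      exact h0 (Or.inl (by simp))
    have hlen1 : 1 ≤ a.length := by
      cases a
      · exact absurd rfl hne
      · simp
    have htake : a.take (a.length - 1 + 1) = a := by
      rw [(by omega : a.length - 1 + 1 = a.length), List.take_length]
    have hlt : a.length - 1 < a.length := by omega
    have hRB : ("R" : String) ≠ "B" := by decide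
    have hBR : ("B" : String) ≠ "R" := by decide
    have hfront : solutionFront a 0 0 0 =
        ((if a.headD "" = "R" then ((a.takeWhile (fun x => x == a.headD "")).length : Int) else 0),
         (if a.headD "" = "B" then ((a.takeWhile (fun x => x == a.headD "")).length : Int) else 0)) := by
      by_cases hf : a.headD "" = "R"
      · rw [front_run a "R" hf (Or.inl rfl) 0 0 0, hf]
        simp [hRB]
      · by_cases hb : a.headD "" = "B"
        · rw [front_run a "B" hb (Or.inr rfl) 0 0 0, hb]
          simp [hBR]
        · rw [front_other a hf hb 0 0 0, if_neg hf, if_neg hb]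
    have hrear : solutionRear a (a.length - 1) 0 0 =
        ((if a.getLastD "" = "R" then ((a.reverse.takeWhile (fun x => x == a.getLastD "")).length : Int) else 0),
         (if a.getLastD "" = "B" then ((a.reverse.takeWhile (fun x => x == a.getLastD "")).length : Int) else 0)) := by
      by_cases hf : a.getLastD "" = "R"
      · rw [rear_run a "R" hf (Or.inl rfl) (a.length - 1) 0 0 hlt, htake, hf]
        simp [hRB]
      · by_cases hb : a.getLastD "" = "B"
        · rw [rear_run a "B" hb (Or.inr rfl) (a.length - 1) 0 0 hlt, htake, hb]
          simp [hBR]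
        · rw [rear_other a hf hb (a.length - 1) 0 0, if_neg hf, if_neg hb]
    simp only [solution, solution_alt, rle_sumR, if_neg h0, hfront, hrear,
      rle_head a hne, rle_last a hne]
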